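-- pv_equiv track=rewrite | github.com/bozzzzo/aoc | 2021/14/x.py | grow_first
-- ===== SOURCE A (Python) =====
-- import collections
--
-- def grow_first(n, initial, rules):
--     def once(x):
--         yield x[0]
--         for i in range(0,len(x)-1):
--             yield rules[x[i:i+2]]
--             yield x[i+1]
--     p = initial
--     for _ in range(n):
--         p = "".join(once(p))
--     return p, collections.Counter(sorted(p))
-- ===== SOURCE B (Python) =====
-- import collections
--
-- def grow_first(n, initial, rules):
--     def mid(a, b, d):
--         if d <= 0:
--             return ''
--         c = rules[a + b]
--         return mid(a, c, d - 1) + c + mid(c, b, d - 1)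
--     p = ''.join(a + mid(a, b, n) for a, b in zip(initial, initial[1:])) + initial[-1:]
--     return p, collections.Counter(sorted(p))
-- ===== Notes on version B (the rewrite author's own statement) =====
-- stated objective: alternative
-- what changed: A rebuilds the whole string n times, each pass re-scanning the previous level; B expands each adjacent pair of the initial string once, depth-first, with a recursive mid(a,b,d) that returns the characters inserted strictly between a and b after d steps, then stitches initial[i] + mid + ... + initial[-1:] in a single walk.
-- outside the precondition, e.g. on grow_first(2, 'AB', {'AB': ''}): A returns ('AB', {'A': 1, 'B': 1}), B raises KeyError
import Mathlib
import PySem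

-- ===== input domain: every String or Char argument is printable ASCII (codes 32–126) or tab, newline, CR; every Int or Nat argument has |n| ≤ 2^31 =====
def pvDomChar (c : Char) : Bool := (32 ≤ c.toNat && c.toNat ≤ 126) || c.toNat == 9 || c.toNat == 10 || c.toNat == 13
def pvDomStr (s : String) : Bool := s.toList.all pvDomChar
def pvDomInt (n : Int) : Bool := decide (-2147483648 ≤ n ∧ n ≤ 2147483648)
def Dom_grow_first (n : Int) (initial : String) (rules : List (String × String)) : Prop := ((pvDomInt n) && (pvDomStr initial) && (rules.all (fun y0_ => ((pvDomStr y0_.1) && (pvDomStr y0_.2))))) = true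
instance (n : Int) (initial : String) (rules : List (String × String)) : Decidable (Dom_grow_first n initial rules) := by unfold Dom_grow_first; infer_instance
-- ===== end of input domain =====

-- B replaces A's n-fold whole-string rebuilding by a depth-first recursive expansion of each
-- adjacent pair (alternative decomposition, similar cost); return values agree on Pre_.

-- shared helper: first-match lookup in the association list (Python dict access rules[k])
def lookupC (rules : List (String × String)) (key : List Char) : Option (List Char) :=
  match rules with
  | [] => none
  | (k, v) :: rest => if k.toList = key then some v.toList else lookupC rest key

-- shared helper: both Pythons end with `return p, collections.Counter(sorted(p))`
def countSorted (q : List Char) : List (String × Int) :=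
  (PySem.Dict.counter ((PySem.List.sorted q (fun c => c) false).map (fun c => String.ofList [c]))).items

-- ===== PORT A =====
-- the generator `once`: yield x[0]; for i in range(0, len(x)-1): yield rules[x[i:i+2]]; yield x[i+1]
-- (Option: none exactly where Python raises IndexError / KeyError)
def onceA (rules : List (String × String)) (x : List Char) : Option (List Char) :=
  match PySem.List.pyGet? x 0 with
  | none => none
  | some c0 =>
    (PySem.List.pyRange 0 (PySem.List.len x - 1) 1).foldl
      (fun acc i =>
        match acc with
        | none => none
        | some a =>
          match lookupC rules (PySem.List.slice x (some i) (some (i + 2))) with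
          | none => none
          | some r =>
            match PySem.List.pyGet? x (i + 1) with
            | none => none
            | some b => some (a ++ r ++ [b]))
      (some [c0])

def grow_first (n : Int) (initial : String) (rules : List (String × String)) : String × (List (String × Int)) :=
  match (PySem.List.pyRange 0 n 1).foldl (fun p _ => p.bind (onceA rules)) (some initial.toList) with
  | some q => (String.ofList q, countSorted q)
  | none => ("", [])   -- unreachable under Pre_ (Python raises here)

-- ===== PORT B =====
-- mid(a, b, d): '' when d <= 0, else c = rules[a+b]; mid(a,c,d-1) + c + mid(c,b,d-1)
-- (fuel d : Nat with d = 0 ↔ Python's d <= 0; none where Python raises KeyError)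
def midB (rules : List (String × String)) : List Char → List Char → Nat → Option (List Char)
  | _, _, 0 => some []
  | a, b, d + 1 =>
    match lookupC rules (a ++ b) with
    | none => none
    | some c =>
      match midB rules a c d with
      | none => none
      | some l =>
        match midB rules c b d with
        | none => none
        | some r => some (l ++ c ++ r)

-- ''.join(a + mid(a, b, n) for a, b in zip(initial, initial[1:])) + initial[-1:]
def grow_first_alt (n : Int) (initial : String) (rules : List (String × String)) : String × (List (String × Int)) :=
  match (initial.toList.zip (PySem.List.slice initial.toList (some 1) none)).foldl
      (fun acc ab =>
        match acc with
        | none => none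
        | some a =>
          match midB rules [ab.1] [ab.2] n.toNat with
          | none => none
          | some m => some (a ++ ab.1 :: m)) (some []) with
  | some q => (String.ofList (q ++ PySem.List.slice initial.toList (some (-1)) none),
               countSorted (q ++ PySem.List.slice initial.toList (some (-1)) none))
  | none => ("", [])   -- unreachable under Pre_ (Python raises here)

-- ===== PRECONDITION & SPEC =====
-- the characters growth can ever touch: those of the initial string and of the rule values
def alphaOf (initial : String) (rules : List (String × String)) : List Char :=
  initial.toList ++ rules.flatMap (fun r => r.2.toList)

-- does the pair (a, b) map to a single character?  (first entry with this key, as for a dict)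
def singleRule (rules : List (String × String)) (a b : Char) : Bool :=
  match rules.find? (fun r => r.1.toList == [a, b]) with
  | some r => r.2.toList.length == 1
  | none => false

-- Pre_ = inputs where A surely returns: n <= 0 (no step runs), a one-character initial (no pair is
-- ever looked up), or a nonempty initial with a single-character rule for EVERY pair over the
-- touchable alphabet.  The last disjunct is a conservative closed-form closure condition: it also
-- excludes some inputs on which A happens to return (a partial rule set that is sufficient for the
-- pairs actually reached, or multi-character rule values that never get re-paired) — exact
-- reachability cannot be stated without simulating the n steps.
def Pre_grow_first (n : Int) (initial : String) (rules : List (String × String)) : Prop :=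
  n ≤ 0 ∨ initial.toList.length = 1 ∨
    (initial.toList ≠ [] ∧
      ∀ a ∈ alphaOf initial rules, ∀ b ∈ alphaOf initial rules, singleRule rules a b = true)

instance (n : Int) (initial : String) (rules : List (String × String)) : Decidable (Pre_grow_first n initial rules) := by unfold Pre_grow_first; infer_instance

def pvWitness_grow_first : Int × String × (List (String × String)) :=
  (3, "A", [])

def Spec_grow_first (n : Int) (initial : String) (rules : List (String × String)) (out : String × (List (String × Int))) : Prop := out = grow_first_alt n initial rules
instance (n : Int) (initial : String) (rules : List (String × String)) (out : String × (List (String × Int))) : Decidable (Spec_grow_first n initial rules out) := by unfold Spec_grow_first; infer_instance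

-- ===== CLAIM (what is proved, stated in full; the proofs are below) =====
def Claim_equal_grow_first : Prop := ∀ (n : Int) (initial : String) (rules : List (String × String)), Dom_grow_first n initial rules → Pre_grow_first n initial rules → Spec_grow_first n initial rules (grow_first n initial rules)

-- ===== LEMMAS AND PROOFS =====

-- the inserted character for the pair (a, b) (proof-side; meaningful under the closure hypothesis)
def fC (rules : List (String × String)) (a b : Char) : Char :=
  match lookupC rules [a, b] with
  | some (c :: _) => c
  | _ => 'A'

-- mid after d steps, as a pure function of the pair
def mSpec (rules : List (String × String)) : Nat → Char → Char → List Char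
  | 0, _, _ => []
  | d + 1, a, b =>
    mSpec rules d a (fC rules a b) ++ fC rules a b :: mSpec rules d (fC rules a b) b

-- everything strictly after a, given the tail t, after d steps
def gSpec (rules : List (String × String)) (d : Nat) : Char → List Char → List Char
  | _, [] => []
  | a, b :: t => mSpec rules d a b ++ b :: gSpec rules d b t

-- the whole polymer after d steps
def ESpec (rules : List (String × String)) (d : Nat) : List Char → List Char
  | [] => []
  | h :: t => h :: gSpec rules d h t

-- B's per-pair chunks (a followed by mid a b), before the final character is appended
def gJ (rules : List (String × String)) (d : Nat) : Char → List Char → List Char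
  | _, [] => []
  | a, b :: t => a :: mSpec rules d a b ++ gJ rules d b t

-- A's loop `for _ in range(n): p = once(p)` as a Nat recursion
def iterB {α : Type} (f : α → Option α) : Nat → Option α → Option α
  | 0, p => p
  | d + 1, p => iterB f d (p.bind f)

theorem foldl_eq_iterB {α : Type} (f : α → Option α) :
    ∀ (l : List Int) (s : Option α),
      l.foldl (fun p _ => p.bind f) s = iterB f l.length s := by
  intro l
  induction l with
  | nil => intro s; rfl
  | cons i t ih => intro s; simpa [List.foldl, iterB] using ih (s.bind f)

theorem gSpec_zero (rules : List (String × String)) :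
    ∀ (t : List Char) (a : Char), gSpec rules 0 a t = t := by
  intro t
  induction t with
  | nil => intro a; rfl
  | cons b t ih => intro a; simp [gSpec, mSpec, ih]

theorem ESpec_zero (rules : List (String × String)) (x : List Char) :
    ESpec rules 0 x = x := by
  cases x with
  | nil => rfl
  | cons h t => simp [ESpec, gSpec_zero]

theorem gSpec_comp (rules : List (String × String)) (d : Nat) :
    ∀ (t : List Char) (a : Char),
      gSpec rules d a (gSpec rules 1 a t) = gSpec rules (d + 1) a t := by
  intro t
  induction t with
  | nil => intro a; rfl
  | cons b t ih =>
    intro a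
    simp [gSpec, mSpec, ih b]

theorem ESpec_comp (rules : List (String × String)) (d : Nat) (x : List Char) :
    ESpec rules d (ESpec rules 1 x) = ESpec rules (d + 1) x := by
  cases x with
  | nil => rfl
  | cons h t => simp [ESpec, gSpec_comp]

-- characters of a looked-up rule value lie in the alphabet
theorem lookup_val_sub (initial : String) :
    ∀ (rules rest : List (String × String)) (key v : List Char),
      (∀ r ∈ rest, r ∈ rules) → lookupC rest key = some v →
      ∀ c ∈ v, c ∈ alphaOf initial rules := by
  intro rules rest
  induction rest with
  | nil => intro key v _ h; simp [lookupC] at h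
  | cons r t ih =>
    intro key v hsub h c hc
    rcases r with ⟨k, w⟩
    by_cases hk : k.toList = key
    · simp [lookupC, hk] at h
      subst h
      have : (k, w) ∈ rules := hsub _ (by simp)
      simp only [alphaOf, List.mem_append, List.mem_flatMap]
      exact Or.inr ⟨(k, w), this, hc⟩
    · simp [lookupC, hk] at h
      exact ih key v (fun r hr => hsub r (by simp [hr])) h c hc

-- lookupC is find?-then-project (bridges Pre_'s phrasing to the ports' dict access)
theorem lookupC_find (rules : List (String × String)) (key : List Char) :
    lookupC rules key = (rules.find? (fun r => r.1.toList == key)).map (fun r => r.2.toList) := by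
  induction rules with
  | nil => rfl
  | cons r t ih =>
    by_cases hk : r.1.toList = key
    · simp [lookupC, List.find?, hk]
    · have hb : (r.1.toList == key) = false := beq_eq_false_iff_ne.mpr hk
      simp only [lookupC]
      rw [if_neg hk]
      simp [List.find?, hb, ih]

-- the closure hypothesis H used throughout, derived from Pre_'s third disjunct
theorem closure_of_pre (initial : String) (rules : List (String × String))
    (hcl : ∀ a ∈ alphaOf initial rules, ∀ b ∈ alphaOf initial rules, singleRule rules a b = true) :
    ∀ a b : Char, a ∈ alphaOf initial rules → b ∈ alphaOf initial rules →
      lookupC rules [a, b] = some [fC rules a b] ∧ fC rules a b ∈ alphaOf initial rules := by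
  intro a b ha hb
  have h := hcl a ha b hb
  unfold singleRule at h
  have hlf := lookupC_find rules [a, b]
  rcases hf? : rules.find? (fun r => r.1.toList == [a, b]) with _ | r
  · rw [hf?] at h; simp at h
  · rw [hf?] at h hlf
    have h' : (r.2.toList.length == 1) = true := h
    have hlf' : lookupC rules [a, b] = some r.2.toList := hlf
    rcases hv : r.2.toList with _ | ⟨c, _ | ⟨c', w⟩⟩
    · rw [hv] at h'; simp at h'
    · have hl : lookupC rules [a, b] = some [c] := by rw [hlf', hv]
      have hfc : fC rules a b = c := by unfold fC; rw [hl]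
      refine ⟨by simp [hl, hfc], ?_⟩
      rw [hfc]
      exact lookup_val_sub initial rules rules [a, b] [c] (fun r hr => hr) hl c (by simp)
    · rw [hv] at h'; simp at h'

-- ===== A side =====

-- the fold inside once, over the suffix a :: t of x starting at index pre.length
theorem onceA_fold (initial : String) (rules : List (String × String)) (x : List Char)
    (H : ∀ a b : Char, a ∈ alphaOf initial rules → b ∈ alphaOf initial rules →
      lookupC rules [a, b] = some [fC rules a b] ∧ fC rules a b ∈ alphaOf initial rules) :
    ∀ (t : List Char) (a : Char) (pre : List Char) (acc : List Char),
      x = pre ++ a :: t →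
      a ∈ alphaOf initial rules → (∀ c ∈ t, c ∈ alphaOf initial rules) →
      (PySem.List.pyRange (pre.length : Int) ((x.length : Int) - 1) 1).foldl
        (fun acc i =>
          match acc with
          | none => none
          | some a =>
            match lookupC rules (PySem.List.slice x (some i) (some (i + 2))) with
            | none => none
            | some r =>
              match PySem.List.pyGet? x (i + 1) with
              | none => none
              | some b => some (a ++ r ++ [b]))
        (some acc) = some (acc ++ gSpec rules 1 a t) := by
  intro t
  induction t with
  | nil =>
    intro a pre acc hx ha ht
    have hxl : x.length = pre.length + 1 := by subst hx; simp
    have hlen : (x.length : Int) - 1 = (pre.length : Int) := by rw [hxl]; push_cast; ring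
    rw [hlen, PySem.List.pyRange_one_eq_nil (le_refl _)]
    simp [gSpec]
  | cons b t ih =>
    intro a pre acc hx ha ht
    have hxl : x.length = pre.length + t.length + 2 := by subst hx; simp; omega
    have hlt : (pre.length : Int) < (x.length : Int) - 1 := by rw [hxl]; push_cast; omega
    rw [PySem.List.pyRange_one_cons hlt]
    have hsl : PySem.List.slice x (some (pre.length : Int)) (some ((pre.length : Int) + 2)) = [a, b] := by
      have h2 : ((pre.length : Int) + 2) = ((pre.length + 2 : Nat) : Int) := by push_cast; ring
      rw [h2, PySem.List.slice_natCast, hx]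
      simp [List.drop_left']
    have hg : PySem.List.pyGet? x ((pre.length : Int) + 1) = some b := by
      have h1 : ((pre.length : Int) + 1) = ((pre.length + 1 : Nat) : Int) := by push_cast; ring
      rw [h1, PySem.List.pyGet?_natCast, hx]
      simp
    have hb : b ∈ alphaOf initial rules := ht b (by simp)
    have hla := (H a b ha hb).1
    simp only [List.foldl_cons, hsl, hla, hg]
    have hx' : x = (pre ++ [a]) ++ b :: t := by simp [hx]
    have := ih b (pre ++ [a]) (acc ++ [fC rules a b] ++ [b]) hx' hb
      (fun c hc => ht c (by simp [hc]))
    have hl1 : (((pre ++ [a]).length : Nat) : Int) = (pre.length : Int) + 1 := by simp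
    rw [hl1] at this
    rw [this]
    simp [gSpec, mSpec]

theorem onceA_eq (initial : String) (rules : List (String × String))
    (H : ∀ a b : Char, a ∈ alphaOf initial rules → b ∈ alphaOf initial rules →
      lookupC rules [a, b] = some [fC rules a b] ∧ fC rules a b ∈ alphaOf initial rules)
    (x : List Char) (hsub : ∀ c ∈ x, c ∈ alphaOf initial rules) (hne : x ≠ []) :
    onceA rules x = some (ESpec rules 1 x) := by
  rcases x with _ | ⟨h, t⟩
  · exact absurd rfl hne
  · unfold onceA
    rw [PySem.List.pyGet?_zero_cons]
    have := onceA_fold initial rules (h :: t) H t h [] [h] rfl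
      (hsub h (by simp)) (fun c hc => hsub c (by simp [hc]))
    simpa [ESpec] using this

-- characters produced by one step stay in the alphabet
theorem gSpec_one_sub (initial : String) (rules : List (String × String))
    (H : ∀ a b : Char, a ∈ alphaOf initial rules → b ∈ alphaOf initial rules →
      lookupC rules [a, b] = some [fC rules a b] ∧ fC rules a b ∈ alphaOf initial rules) :
    ∀ (t : List Char) (a : Char), a ∈ alphaOf initial rules →
      (∀ c ∈ t, c ∈ alphaOf initial rules) →
      ∀ c ∈ gSpec rules 1 a t, c ∈ alphaOf initial rules := by
  intro t
  induction t with
  | nil => intro a _ _ c hc; simp [gSpec] at hc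
  | cons b t ih =>
    intro a ha ht c hc
    have hb : b ∈ alphaOf initial rules := ht b (by simp)
    simp only [gSpec, mSpec, List.nil_append, List.mem_append, List.mem_cons] at hc
    rcases hc with h | h | h
    · simp at h; rw [h]; exact (H a b ha hb).2
    · rw [h]; exact hb
    · exact ih b hb (fun c hc => ht c (by simp [hc])) c h

theorem ESpec_one_sub (initial : String) (rules : List (String × String))
    (H : ∀ a b : Char, a ∈ alphaOf initial rules → b ∈ alphaOf initial rules →
      lookupC rules [a, b] = some [fC rules a b] ∧ fC rules a b ∈ alphaOf initial rules)
    (x : List Char) (hsub : ∀ c ∈ x, c ∈ alphaOf initial rules) :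
    ∀ c ∈ ESpec rules 1 x, c ∈ alphaOf initial rules := by
  rcases x with _ | ⟨h, t⟩
  · intro c hc; simp [ESpec] at hc
  · intro c hc
    simp only [ESpec, List.mem_cons] at hc
    rcases hc with h' | h'
    · rw [h']; exact hsub h (by simp)
    · exact gSpec_one_sub initial rules H t h (hsub h (by simp))
        (fun c hc => hsub c (by simp [hc])) c h'

-- A's loop computes ESpec
theorem iterB_eq (initial : String) (rules : List (String × String))
    (H : ∀ a b : Char, a ∈ alphaOf initial rules → b ∈ alphaOf initial rules →
      lookupC rules [a, b] = some [fC rules a b] ∧ fC rules a b ∈ alphaOf initial rules) :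
    ∀ (d : Nat) (x : List Char), x ≠ [] → (∀ c ∈ x, c ∈ alphaOf initial rules) →
      iterB (onceA rules) d (some x) = some (ESpec rules d x) := by
  intro d
  induction d with
  | zero => intro x _ _; simp [iterB, ESpec_zero]
  | succ d ih =>
    intro x hne hsub
    have h1 : onceA rules x = some (ESpec rules 1 x) := onceA_eq initial rules H x hsub hne
    have hne1 : ESpec rules 1 x ≠ [] := by
      rcases x with _ | ⟨h, t⟩
      · exact absurd rfl hne
      · simp [ESpec]
    have hsub1 := ESpec_one_sub initial rules H x hsub
    simp only [iterB, Option.bind_some, h1]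
    rw [ih (ESpec rules 1 x) hne1 hsub1, ESpec_comp]

-- one application of once on a single character
theorem onceA_single (rules : List (String × String)) (a : Char) :
    onceA rules [a] = some [a] := by
  unfold onceA
  rw [PySem.List.pyGet?_zero_cons]
  have : (PySem.List.len [a] - 1 : Int) = 0 := by simp
  rw [this, PySem.List.pyRange_one_eq_nil (le_refl _)]
  rfl

theorem iterB_single (rules : List (String × String)) (a : Char) :
    ∀ d : Nat, iterB (onceA rules) d (some [a]) = some [a] := by
  intro d
  induction d with
  | zero => rfl
  | succ d ih => simp only [iterB, Option.bind_some, onceA_single]; exact ih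

-- ===== B side =====

theorem midB_eq (initial : String) (rules : List (String × String))
    (H : ∀ a b : Char, a ∈ alphaOf initial rules → b ∈ alphaOf initial rules →
      lookupC rules [a, b] = some [fC rules a b] ∧ fC rules a b ∈ alphaOf initial rules) :
    ∀ (d : Nat) (a b : Char), a ∈ alphaOf initial rules → b ∈ alphaOf initial rules →
      midB rules [a] [b] d = some (mSpec rules d a b) := by
  intro d
  induction d with
  | zero => intro a b _ _; rfl
  | succ d ih =>
    intro a b ha hb
    have hla := (H a b ha hb).1
    have hf := (H a b ha hb).2
    show (match lookupC rules ([a] ++ [b]) with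
      | none => none
      | some c => match midB rules [a] c d with
        | none => none
        | some l => match midB rules c [b] d with
          | none => none
          | some r => some (l ++ c ++ r)) = _
    have : ([a] ++ [b] : List Char) = [a, b] := rfl
    rw [this]
    simp only [hla]
    simp [ih a (fC rules a b) ha hf, ih (fC rules a b) b hf hb, mSpec]

-- B's fold over the zipped pairs, given that every pair's mid is computed by mSpec
theorem foldB_eq (rules : List (String × String)) (dn : Nat) (P : Char → Prop)
    (hm : ∀ a b : Char, P a → P b → midB rules [a] [b] dn = some (mSpec rules dn a b)) :
    ∀ (t : List Char) (a : Char) (acc : List Char), P a → (∀ c ∈ t, P c) →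
      ((a :: t).zip t).foldl
        (fun acc ab =>
          match acc with
          | none => none
          | some a =>
            match midB rules [ab.1] [ab.2] dn with
            | none => none
            | some m => some (a ++ ab.1 :: m)) (some acc)
      = some (acc ++ gJ rules dn a t) := by
  intro t
  induction t with
  | nil => intro a acc _ _; simp [gJ]
  | cons b t ih =>
    intro a acc ha ht
    have hb : P b := ht b (by simp)
    simp only [List.zip_cons_cons, List.foldl_cons, hm a b ha hb]
    rw [ih b (acc ++ a :: mSpec rules dn a b) hb (fun c hc => ht c (by simp [hc]))]
    simp [gJ]

-- appending the final character turns B's chunks into the full polymer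
theorem gJ_last (rules : List (String × String)) (dn : Nat) :
    ∀ (t : List Char) (a : Char),
      gJ rules dn a t ++ (a :: t).drop t.length = a :: gSpec rules dn a t := by
  intro t
  induction t with
  | nil => intro a; simp [gJ, gSpec]
  | cons b t ih =>
    intro a
    have hd : (a :: b :: t).drop (b :: t).length = (b :: t).drop t.length := by
      simp
    rw [List.length_cons] at hd ⊢
    simp only [gJ, List.cons_append, List.append_assoc]
    rw [hd, ih b]
    simp [gSpec]

-- the last-character slice initial[-1:] is a drop
theorem slice_last (xs : List Char) :
    PySem.List.slice xs (some (-1)) none = xs.drop (xs.length - 1) := by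
  rw [PySem.List.slice_from_neg_one]

-- ===== VERDICT helpers =====

theorem main_equiv (n : Int) (initial : String) (rules : List (String × String))
    (hpre : Pre_grow_first n initial rules) :
    grow_first n initial rules = grow_first_alt n initial rules := by
  rcases hpre with hn | h1 | ⟨hne, hcl⟩
  · -- n ≤ 0 : A runs no step, B's mids have fuel 0
    have hA : PySem.List.pyRange 0 n 1 = [] := PySem.List.pyRange_one_eq_nil hn
    have hn0 : n.toNat = 0 := Int.toNat_of_nonpos hn
    unfold grow_first grow_first_alt
    rw [hA, hn0, PySem.List.slice_from_one, slice_last]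
    rcases hx : initial.toList with _ | ⟨h, t⟩
    · simp
    · have hfold := foldB_eq rules 0 (fun _ => True) (fun a b _ _ => rfl) t h []
        trivial (fun _ _ => trivial)
      simp only [List.tail_cons, List.foldl_nil, hfold, List.nil_append,
        List.length_cons, Nat.add_sub_cancel]
      rw [gJ_last]
      simp [gSpec_zero]
  · -- len(initial) = 1 : once only re-yields x[0]
    rcases hx : initial.toList with _ | ⟨a, t⟩
    · rw [hx] at h1; simp at h1
    · have ht : t = [] := by rw [hx] at h1; simpa using h1
      subst ht
      unfold grow_first grow_first_alt
      rw [hx, PySem.List.slice_from_one, slice_last,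
        foldl_eq_iterB (onceA rules), iterB_single]
      simp
  · -- the closure case
    have H := closure_of_pre initial rules hcl
    rcases hx : initial.toList with _ | ⟨h, t⟩
    · exact absurd hx hne
    · have hsub : ∀ c ∈ initial.toList, c ∈ alphaOf initial rules := by
        intro c hc; exact List.mem_append_left _ hc
      rw [hx] at hsub
      have hlen : (PySem.List.pyRange 0 n 1).length = n.toNat := by
        rw [PySem.List.length_pyRange_one]; simp
      have hiter := iterB_eq initial rules H n.toNat (h :: t) (by simp) hsub
      have hfold := foldB_eq rules n.toNat (fun c => c ∈ alphaOf initial rules)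
        (fun a b ha hb => midB_eq initial rules H n.toNat a b ha hb) t h []
        (hsub h (by simp)) (fun c hc => hsub c (by simp [hc]))
      unfold grow_first grow_first_alt
      rw [hx, PySem.List.slice_from_one, slice_last,
        foldl_eq_iterB (onceA rules), hlen, hiter]
      simp only [List.tail_cons, hfold, List.nil_append,
        List.length_cons, Nat.add_sub_cancel]
      rw [gJ_last]
      rfl

-- ===== VERDICT (by name: the statement is the Claim_ definition above) =====
theorem grow_first_spec : Claim_equal_grow_first := by
  intro n initial rules _ hpre
  unfold Spec_grow_first
  exact main_equiv n initial rules hpre
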